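-- pv_equiv track=rewrite | github.com/maheshgitte77/lipsync-fraud-api | app/services/fraud/proctor_service.py | _count_direction_to_center_cycles
-- ===== SOURCE A (Python) =====
-- def _count_direction_to_center_cycles(seq: list[str], direction: str) -> int:
--     if len(seq) < 2:
--         return 0
--     compressed: list[str] = []
--     for d in seq:
--         if not compressed or compressed[-1] != d:
--             compressed.append(d)
--     cycles = 0
--     for i in range(len(compressed) - 1):
--         if compressed[i] == direction and compressed[i + 1] == "CENTER":
--             cycles += 1
--     return cycles
-- ===== SOURCE B (Python) =====
-- def _count_direction_to_center_cycles(seq: list[str], direction: str) -> int: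
--     prev = None  # sentinel: elements are strings, so None never matches
--     cycles = 0
--     for d in seq:
--         if d != prev:
--             if prev == direction and d == "CENTER":
--                 cycles += 1
--             prev = d
--     return cycles
-- ===== Notes on version B (the rewrite author's own statement) =====
-- stated objective: simpler
-- what changed: Replaces the build-a-compressed-list-then-index-pairs two-phase algorithm with a single fused pass keeping only the previous distinct element and a counter, with no intermediate list and no short-sequence guard.
import Mathlib
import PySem

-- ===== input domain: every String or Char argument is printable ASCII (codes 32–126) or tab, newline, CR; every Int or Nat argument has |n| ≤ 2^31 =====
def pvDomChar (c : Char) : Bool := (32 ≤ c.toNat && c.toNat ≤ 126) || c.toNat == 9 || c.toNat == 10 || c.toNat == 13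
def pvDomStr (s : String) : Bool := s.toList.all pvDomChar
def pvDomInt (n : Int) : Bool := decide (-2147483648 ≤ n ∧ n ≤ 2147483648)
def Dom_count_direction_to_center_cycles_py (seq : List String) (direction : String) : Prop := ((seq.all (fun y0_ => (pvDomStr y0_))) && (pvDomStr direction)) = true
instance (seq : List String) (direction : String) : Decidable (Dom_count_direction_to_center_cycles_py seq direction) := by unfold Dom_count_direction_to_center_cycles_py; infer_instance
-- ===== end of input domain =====

-- B replaces A's two-phase (build a run-compressed copy, then scan index pairs) by one fused pass
-- keeping only the previous distinct element and a counter: simpler, no intermediate list.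

-- ===== PORT A =====
def count_direction_to_center_cycles_py (seq : List String) (direction : String) : Int :=
  if seq.length < 2 then 0
  else
    let compressed : List String :=
      seq.foldl (fun compressed d =>
        if compressed = [] ∨ compressed.getLast? ≠ some d then compressed ++ [d] else compressed) []
    (PySem.List.pyRange 0 ((compressed.length : Int) - 1) 1).foldl
      (fun cycles i =>
        if PySem.List.pyGetD compressed i "" = direction ∧
           PySem.List.pyGetD compressed (i + 1) "" = "CENTER"
        then cycles + 1 else cycles) 0

-- ===== PORT B =====
def count_direction_to_center_cycles_py_alt (seq : List String) (direction : String) : Int :=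
  (seq.foldl (fun (st : Option String × Int) d =>
      if st.1 ≠ some d then
        (some d, if st.1 = some direction ∧ d = "CENTER" then st.2 + 1 else st.2)
      else st) (none, 0)).2

-- ===== PRECONDITION & SPEC =====
def Spec_count_direction_to_center_cycles_py (seq : List String) (direction : String) (out : Int) : Prop := out = count_direction_to_center_cycles_py_alt seq direction
instance (seq : List String) (direction : String) (out : Int) : Decidable (Spec_count_direction_to_center_cycles_py seq direction out) := by unfold Spec_count_direction_to_center_cycles_py; infer_instance

-- ===== CLAIM (what is proved, stated in full; the proofs are below) =====
def Claim_equal_count_direction_to_center_cycles_py : Prop := ∀ (seq : List String) (direction : String), Dom_count_direction_to_center_cycles_py seq direction → Spec_count_direction_to_center_cycles_py seq direction (count_direction_to_center_cycles_py seq direction)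

-- ===== LEMMAS AND PROOFS =====

-- A's compression step and pair-counting loop, named for the proofs.
def pvStepA (c : List String) (d : String) : List String :=
  if c = [] ∨ c.getLast? ≠ some d then c ++ [d] else c

def pvLoopA (direction : String) (c : List String) : Int :=
  (PySem.List.pyRange 0 ((c.length : Int) - 1) 1).foldl
    (fun cycles i =>
      if PySem.List.pyGetD c i "" = direction ∧
         PySem.List.pyGetD c (i + 1) "" = "CENTER"
      then cycles + 1 else cycles) 0

def pvStepB (direction : String) (st : Option String × Int) (d : String) : Option String × Int :=
  if st.1 ≠ some d then
    (some d, if st.1 = some direction ∧ d = "CENTER" then st.2 + 1 else st.2)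
  else st

lemma pvLoopA_nil (direction : String) : pvLoopA direction [] = 0 := by
  simp [pvLoopA]

lemma pvLoopA_sum (direction : String) (c : List String) :
    pvLoopA direction c =
      ((PySem.List.pyRange 0 ((c.length : Int) - 1) 1).map
        (fun i => if PySem.List.pyGetD c i "" = direction ∧
                     PySem.List.pyGetD c (i + 1) "" = "CENTER" then (1:Int) else 0)).sum := by
  unfold pvLoopA
  have hcongr := PySem.List.foldl_congr_mem
    (PySem.List.pyRange 0 ((c.length : Int) - 1) 1)
    (fun cycles i =>
      if PySem.List.pyGetD c i "" = direction ∧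
         PySem.List.pyGetD c (i + 1) "" = "CENTER" then cycles + 1 else cycles)
    (fun cycles i => cycles +
      (if PySem.List.pyGetD c i "" = direction ∧
          PySem.List.pyGetD c (i + 1) "" = "CENTER" then (1:Int) else 0))
    0 (by intro acc x _; dsimp only; split <;> simp)
  rw [hcongr, PySem.List.foldl_add]
  simp

lemma pvLoopA_append (direction d : String) (c : List String) :
    pvLoopA direction (c ++ [d]) =
      pvLoopA direction c +
        (if c.getLast? = some direction ∧ d = "CENTER" then 1 else 0) := by
  rcases c.eq_nil_or_concat' with rfl | ⟨c', x, rfl⟩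
  · have h1 : pvLoopA direction [d] = 0 := by simp [pvLoopA]
    simp [pvLoopA_nil, h1]
  · -- c = c' ++ [x], nonempty
    set cc := c' ++ [x] with hcc
    have hlen : (1:Int) ≤ (cc.length : Int) := by simp [hcc]
    have hsplit : PySem.List.pyRange 0 (((cc ++ [d]).length : Int) - 1) 1
        = PySem.List.pyRange 0 ((cc.length : Int) - 1) 1 ++ [(cc.length : Int) - 1] := by
      have : ((cc ++ [d]).length : Int) - 1 = ((cc.length : Int) - 1) + 1 := by
        simp only [List.length_append, List.length_cons, List.length_nil]; omega
      rw [this, PySem.List.pyRange_one_succ_right (by omega)]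
    rw [pvLoopA_sum, pvLoopA_sum, hsplit, List.map_append, List.sum_append]
    congr 1
    · -- initial segment: pyGetD agrees on indices < len cc
      congr 1
      apply List.map_congr_left
      intro i hi
      have hi' := (PySem.List.mem_pyRange_one).1 hi
      have h0 : 0 ≤ i := hi'.1
      have h1 : i < (cc.length : Int) - 1 := hi'.2
      have hclen : i < ((cc.length : Int)) := by omega
      have e1 : PySem.List.pyGetD (cc ++ [d]) i "" = PySem.List.pyGetD cc i "" := by
        rw [PySem.List.pyGetD_eq_getElem (cc ++ [d]) "" h0 (by simp only [List.length_append, List.length_cons, List.length_nil]; omega),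
            PySem.List.pyGetD_eq_getElem cc "" h0 (by omega)]
        exact List.getElem_append_left (by omega)
      have e2 : PySem.List.pyGetD (cc ++ [d]) (i + 1) "" = PySem.List.pyGetD cc (i + 1) "" := by
        rw [PySem.List.pyGetD_eq_getElem (cc ++ [d]) "" (by omega) (by simp only [List.length_append, List.length_cons, List.length_nil]; omega),
            PySem.List.pyGetD_eq_getElem cc "" (by omega) (by omega)]
        exact List.getElem_append_left (by omega)
      rw [e1, e2]
    · -- last index
      have e1 : PySem.List.pyGetD (cc ++ [d]) ((cc.length : Int) - 1) "" = cc.getLast (by simp [hcc]) := by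
        have hidx : ((cc.length : Int) - 1).toNat = cc.length - 1 := by omega
        rw [PySem.List.pyGetD_eq_getElem (cc ++ [d]) "" (by omega) (by simp only [List.length_append, List.length_cons, List.length_nil]; omega)]
        rw [List.getElem_append_left (by omega)]
        simp only [List.getLast_eq_getElem, hidx]
      have e2 : PySem.List.pyGetD (cc ++ [d]) ((cc.length : Int) - 1 + 1) "" = d := by
        have hidx : ((cc.length : Int) - 1 + 1).toNat = cc.length := by omega
        rw [PySem.List.pyGetD_eq_getElem (cc ++ [d]) "" (by omega) (by simp only [List.length_append, List.length_cons, List.length_nil]; omega)]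
        simp
      simp only [List.map_cons, List.map_nil, List.sum_cons, List.sum_nil, add_zero]
      rw [e1, e2]
      have hlast : cc.getLast? = some (cc.getLast (by simp [hcc])) :=
        List.getLast?_eq_some_getLast _
      by_cases hd : cc.getLast (by simp [hcc]) = direction ∧ d = "CENTER"
      · simp [hd, hlast]
      · have : ¬ (cc.getLast? = some direction ∧ d = "CENTER") := by
          rw [hlast]; simpa using hd
        simp [hd, this]

lemma pvKey (direction : String) (seq : List String) : ∀ (c : List String),
    (seq.foldl (pvStepB direction) (c.getLast?, pvLoopA direction c)).2
      = pvLoopA direction (seq.foldl pvStepA c) := by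
  induction seq with
  | nil => intro c; simp
  | cons d seq ih =>
    intro c
    simp only [List.foldl_cons]
    by_cases h : c.getLast? = some d
    · have hc : c ≠ [] := by intro hnil; simp [hnil] at h
      have hA : pvStepA c d = c := by simp [pvStepA, hc, h]
      have hB : pvStepB direction (c.getLast?, pvLoopA direction c) d = (c.getLast?, pvLoopA direction c) := by
        simp [pvStepB, h]
      rw [hA, hB]; exact ih c
    · have hA : pvStepA c d = c ++ [d] := by
        simp [pvStepA]
        intro _; exact h
      have hB : pvStepB direction (c.getLast?, pvLoopA direction c) d
          = ((c ++ [d]).getLast?, pvLoopA direction (c ++ [d])) := by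
        simp [pvStepB, h, pvLoopA_append]
        split <;> simp
      rw [hA, hB]; exact ih (c ++ [d])

lemma pvAlt_eq_loop (seq : List String) (direction : String) :
    count_direction_to_center_cycles_py_alt seq direction
      = pvLoopA direction (seq.foldl pvStepA []) := by
  have h0 : ((none : Option String), (0:Int)) = (([] : List String).getLast?, pvLoopA direction []) := by
    simp [pvLoopA_nil]
  unfold count_direction_to_center_cycles_py_alt
  have : (fun (st : Option String × Int) d =>
      if st.1 ≠ some d then
        (some d, if st.1 = some direction ∧ d = "CENTER" then st.2 + 1 else st.2)
      else st) = pvStepB direction := by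
    funext st d; simp [pvStepB]
  rw [this, h0, pvKey]

-- ===== VERDICT (by name: the statement is the Claim_ definition above) =====
theorem count_direction_to_center_cycles_py_spec : Claim_equal_count_direction_to_center_cycles_py := by
  intro seq direction _
  unfold Spec_count_direction_to_center_cycles_py
  rw [pvAlt_eq_loop]
  unfold count_direction_to_center_cycles_py
  split
  · -- short sequence: seq = [] or [a]; A returns 0, compute B's value
    rename_i hshort
    match seq, hshort with
    | [], _ => simp [pvLoopA_nil]
    | [a], _ =>
        have : ([a] : List String).foldl pvStepA [] = [a] := by
          simp [pvStepA]
        rw [this]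
        have : pvLoopA direction [a] = 0 := by simp [pvLoopA]
        rw [this]
  · rfl
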